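-- pv_equiv track=rewrite | github.com/NebiyouBelaineh/Promise-Sentry | contracts/schema_analyzer.py | classify_evolution
-- ===== SOURCE A (Python) =====
-- def classify_evolution(changes):
--     """Classify the overall schema evolution.
--
--     Returns: 'backward', 'forward', 'full', or 'breaking'.
--     """
--     if not changes:
--         return "none"
--
--     compatibilities = {c["compatibility"] for c in changes}
--
--     if "breaking" in compatibilities:
--         return "breaking"
--     if compatibilities == {"backward"}:
--         return "backward"
--     if compatibilities == {"forward"}:
--         return "forward"
--     if compatibilities == {"backward", "forward"}:
--         return "full"
--     return "backward"
-- ===== SOURCE B (Python) =====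
-- # Bitmask-semilattice classification: each status maps to a bitmask whose
-- # bitwise-OR join determines the verdict via a lookup table -- no set
-- # construction, no set-equality tests, no if/elif classification ladder.
--
-- _CODE = {"backward": 1, "forward": 2, "breaking": 15}
-- _RENDER = {1: "backward", 2: "forward", 3: "full", 7: "backward", 15: "breaking"}
--
--
-- def classify_evolution(changes):
--     if not changes:
--         return "none"
--     m = 0
--     for c in changes:
--         m |= _CODE.get(c["compatibility"], 7)
--     return _RENDER[m]
-- ===== Notes on version B (the rewrite author's own statement) =====
-- stated objective: alternative
-- what changed: Replaces the set comprehension plus set-equality if/elif ladder by an algebraic join: each compatibility maps to a bitmask in a five-point semilattice, the masks are combined with bitwise OR, and the verdict is read from a lookup table.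
import Mathlib
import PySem

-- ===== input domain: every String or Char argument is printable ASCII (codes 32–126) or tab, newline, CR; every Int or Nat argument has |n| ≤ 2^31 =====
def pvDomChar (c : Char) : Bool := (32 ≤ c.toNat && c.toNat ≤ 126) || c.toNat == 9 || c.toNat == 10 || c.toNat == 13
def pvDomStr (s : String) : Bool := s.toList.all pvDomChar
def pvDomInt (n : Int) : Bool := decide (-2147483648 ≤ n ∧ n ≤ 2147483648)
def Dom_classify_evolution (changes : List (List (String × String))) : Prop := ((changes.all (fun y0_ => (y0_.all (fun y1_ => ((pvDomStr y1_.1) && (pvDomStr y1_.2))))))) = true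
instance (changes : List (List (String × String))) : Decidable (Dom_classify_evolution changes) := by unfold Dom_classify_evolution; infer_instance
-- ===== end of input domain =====

-- B replaces the set + set-equality ladder by a bitmask-semilattice join (bitwise OR) with a lookup table; same results.

-- ===== PORT A =====
def classify_evolution (changes : List (List (String × String))) : String :=
  if changes = [] then "none"
  else
    let compatibilities : PySem.Set String :=
      PySem.Set.ofList (changes.map (fun c => ((PySem.Dict.mk c).get? "compatibility").getD ""))
    if PySem.Set.contains compatibilities "breaking" then "breaking"
    else if PySem.Set.equal compatibilities (PySem.Set.ofList ["backward"]) then "backward"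
    else if PySem.Set.equal compatibilities (PySem.Set.ofList ["forward"]) then "forward"
    else if PySem.Set.equal compatibilities (PySem.Set.ofList ["backward", "forward"]) then "full"
    else "backward"

-- ===== PORT B =====
def pvCodeTbl : PySem.Dict String Int :=
  PySem.Dict.mk [("backward", 1), ("forward", 2), ("breaking", 15)]
def pvRenderTbl : PySem.Dict Int String :=
  PySem.Dict.mk [(1, "backward"), (2, "forward"), (3, "full"), (7, "backward"), (15, "breaking")]

def classify_evolution_alt (changes : List (List (String × String))) : String :=
  if changes = [] then "none"
  else
    let m := changes.foldl
      (fun (m : Int) c => Int.lor m <| pvCodeTbl.getD (((PySem.Dict.mk c).get? "compatibility").getD "") 7) 0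
    -- _RENDER[m]: the key m is always present; KeyError would be 'none', defaulted here (unreachable)
    (pvRenderTbl.get? m).getD ""

-- ===== PRECONDITION & SPEC =====
-- Pre_ excludes exactly the inputs where some change lacks the "compatibility" key: Python A (and B) raise KeyError there.
def Pre_classify_evolution (changes : List (List (String × String))) : Prop :=
  changes.all (fun c => ((PySem.Dict.mk c).get? "compatibility").isSome) = true
instance (changes : List (List (String × String))) : Decidable (Pre_classify_evolution changes) := by unfold Pre_classify_evolution; infer_instance
def pvWitness_classify_evolution : (List (List (String × String))) := [[("compatibility", "backward")], [("compatibility", "forward")]]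
def Spec_classify_evolution (changes : List (List (String × String))) (out : String) : Prop := out = classify_evolution_alt changes
instance (changes : List (List (String × String))) (out : String) : Decidable (Spec_classify_evolution changes out) := by unfold Spec_classify_evolution; infer_instance

-- ===== CLAIM (what is proved, stated in full; the proofs are below) =====
def Claim_equal_classify_evolution : Prop := ∀ (changes : List (List (String × String))), Dom_classify_evolution changes → Pre_classify_evolution changes → Spec_classify_evolution changes (classify_evolution changes)

-- ===== LEMMAS AND PROOFS =====

def pvVal (c : List (String × String)) : String := ((PySem.Dict.mk c).get? "compatibility").getD ""

def pvCode (v : String) : Int := pvCodeTbl.getD v 7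

-- canonical join value of a list of status strings
def pvV (l : List String) : Int :=
  if l.any (· == "breaking") then 15
  else if l.any (fun v => !(v == "breaking" || v == "backward" || v == "forward")) then 7
  else if l.any (· == "backward") && l.any (· == "forward") then 3
  else if l.any (· == "forward") then 2
  else if l.any (· == "backward") then 1
  else 0

lemma nat_ldiff_ldiff (k c d : Nat) : (k.ldiff c).ldiff d = k.ldiff (c ||| d) := by
  apply Nat.eq_of_testBit_eq
  intro i
  simp [Nat.testBit_ldiff, Bool.not_or, Bool.and_assoc]

lemma int_lor_zero (m : Int) : Int.lor m 0 = m := by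
  cases m with
  | ofNat k => simp [Int.lor]
  | negSucc k =>
    show Int.negSucc (k.ldiff 0) = Int.negSucc k
    congr 1
    apply Nat.eq_of_testBit_eq
    intro i
    simp [Nat.testBit_ldiff]

lemma int_zero_lor (m : Int) : Int.lor 0 m = m := by
  cases m with
  | ofNat k => simp [Int.lor]
  | negSucc k =>
    show Int.negSucc (k.ldiff 0) = Int.negSucc k
    congr 1
    apply Nat.eq_of_testBit_eq
    intro i
    simp [Nat.testBit_ldiff]

lemma int_lor_assoc (m c d : Int) (hc : 0 ≤ c) (hd : 0 ≤ d) :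
    Int.lor (Int.lor m c) d = Int.lor m (Int.lor c d) := by
  obtain ⟨c, rfl⟩ := Int.eq_ofNat_of_zero_le hc
  obtain ⟨d, rfl⟩ := Int.eq_ofNat_of_zero_le hd
  cases m with
  | ofNat k =>
    show Int.lor (Int.lor (Int.ofNat k) (Int.ofNat c)) (Int.ofNat d)
        = Int.lor (Int.ofNat k) (Int.lor (Int.ofNat c) (Int.ofNat d))
    simp [Int.lor, Nat.lor_assoc]
  | negSucc k =>
    show Int.lor (Int.lor (Int.negSucc k) (Int.ofNat c)) (Int.ofNat d)
        = Int.lor (Int.negSucc k) (Int.lor (Int.ofNat c) (Int.ofNat d))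
    simp [Int.lor, nat_ldiff_ldiff]

lemma pvCode_eval (v : String) :
    pvCode v = if v = "backward" then 1 else if v = "forward" then 2 else if v = "breaking" then 15 else 7 := by
  unfold pvCode pvCodeTbl
  simp only [PySem.Dict.getD_eq_get?_getD, PySem.Dict.get?_mk_cons]
  by_cases h1 : v = "backward"
  · subst h1; simp
  · rw [if_neg (by simp only [beq_iff_eq]; exact Ne.symm h1), if_neg h1]
    by_cases h2 : v = "forward"
    · subst h2; simp
    · rw [if_neg (by simp only [beq_iff_eq]; exact Ne.symm h2), if_neg h2]
      by_cases h3 : v = "breaking"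
      · subst h3; simp
      · rw [if_neg (by simp only [beq_iff_eq]; exact Ne.symm h3), if_neg h3]
        rfl

lemma pvCode_nonneg (v : String) : 0 ≤ pvCode v := by
  rw [pvCode_eval]; split_ifs <;> decide

lemma pvV_nonneg (l : List String) : 0 ≤ pvV l := by
  unfold pvV; split_ifs <;> decide

set_option maxHeartbeats 4000000 in
lemma pvV_cons (v : String) (l : List String) : pvV (v :: l) = Int.lor (pvCode v) (pvV l) := by
  rw [pvCode_eval]
  unfold pvV
  simp only [List.any_cons]
  rcases Bool.eq_false_or_eq_true (l.any (· == "breaking")) with k | k <;>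
  rcases Bool.eq_false_or_eq_true
    (l.any (fun v => !(v == "breaking" || v == "backward" || v == "forward"))) with o | o <;>
  rcases Bool.eq_false_or_eq_true (l.any (· == "backward")) with b | b <;>
  rcases Bool.eq_false_or_eq_true (l.any (· == "forward")) with f | f <;>
  by_cases h1 : v = "backward" <;> by_cases h2 : v = "forward" <;> by_cases h3 : v = "breaking" <;>
    simp_all <;> first | decide | (split_ifs <;> decide)

lemma fold_eq_pvV (l : List String) (m0 : Int) :
    l.foldl (fun (m : Int) v => Int.lor m (pvCode v)) m0 = Int.lor m0 (pvV l) := by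
  induction l generalizing m0 with
  | nil => simp [pvV, int_lor_zero]
  | cons v l ih =>
    rw [List.foldl_cons, ih, pvV_cons, int_lor_assoc _ _ _ (pvCode_nonneg v) (pvV_nonneg l)]

lemma equal_ofList_iff (l t : List String) :
    PySem.Set.equal (PySem.Set.ofList l) (PySem.Set.ofList t) = true ↔ (∀ x, x ∈ l ↔ x ∈ t) := by
  rw [PySem.Set.equal_iff]
  constructor
  · intro h x; have := h x; simpa [PySem.Set.mem_ofList] using this
  · intro h x; simpa [PySem.Set.mem_ofList] using h x

lemma contains_ofList_iff (l : List String) (x : String) :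
    PySem.Set.contains (PySem.Set.ofList l) x = true ↔ x ∈ l := by
  rw [PySem.Set.contains_iff, PySem.Set.mem_ofList]

-- ===== VERDICT (by name: the statement is the Claim_ definition above) =====
theorem classify_evolution_spec : Claim_equal_classify_evolution := by
  intro changes _ _
  unfold Spec_classify_evolution classify_evolution classify_evolution_alt
  by_cases hne : changes = []
  · simp [hne]
  · rw [if_neg hne, if_neg hne]
    have hfold : changes.foldl
        (fun (m : Int) c => Int.lor m <| pvCodeTbl.getD (((PySem.Dict.mk c).get? "compatibility").getD "") 7) 0
        = pvV (changes.map pvVal) := by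
      have h := fold_eq_pvV (changes.map pvVal) 0
      rw [List.foldl_map, int_zero_lor] at h
      exact h
    rw [hfold]
    have hmap : (List.map (fun c => ((PySem.Dict.mk c).get? "compatibility").getD "") changes)
        = changes.map pvVal := rfl
    rw [hmap]
    set l := changes.map pvVal with hl
    have hlne : l ≠ [] := by simp [hl, hne]
    by_cases hB : "breaking" ∈ l
    · have a1 : PySem.Set.contains (PySem.Set.ofList l) "breaking" = true :=
        (contains_ofList_iff l _).mpr hB
      have b1 : l.any (· == "breaking") = true := by
        rw [List.any_eq_true]; exact ⟨_, hB, by simp⟩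
      simp only [pvV, a1, b1, if_true]
      decide
    · have a1 : PySem.Set.contains (PySem.Set.ofList l) "breaking" = false := by
        rw [Bool.eq_false_iff]; intro h; exact hB ((contains_ofList_iff l _).mp h)
      have b1 : l.any (· == "breaking") = false := by
        rw [Bool.eq_false_iff]; intro h
        rcases List.any_eq_true.mp h with ⟨x, hx, he⟩
        have hx' : x = "breaking" := by simpa using he
        exact hB (hx' ▸ hx)
      by_cases hO : ∃ v ∈ l, v ≠ "breaking" ∧ v ≠ "backward" ∧ v ≠ "forward"
      · rcases hO with ⟨v, hv, hv1, hv2, hv3⟩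
        have bO : (l.any fun v => !(v == "breaking" || v == "backward" || v == "forward")) = true := by
          rw [List.any_eq_true]
          exact ⟨v, hv, by simp [hv1, hv2, hv3]⟩
        have e1 : PySem.Set.equal (PySem.Set.ofList l) (PySem.Set.ofList ["backward"]) = false := by
          rw [Bool.eq_false_iff]; intro h
          have := ((equal_ofList_iff l _).mp h v).mp hv
          simp [hv2] at this
        have e2 : PySem.Set.equal (PySem.Set.ofList l) (PySem.Set.ofList ["forward"]) = false := by
          rw [Bool.eq_false_iff]; intro h
          have := ((equal_ofList_iff l _).mp h v).mp hv
          simp [hv3] at this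
        have e3 : PySem.Set.equal (PySem.Set.ofList l) (PySem.Set.ofList ["backward", "forward"]) = false := by
          rw [Bool.eq_false_iff]; intro h
          have := ((equal_ofList_iff l _).mp h v).mp hv
          simp [hv2, hv3] at this
        simp only [pvV, a1, e1, e2, e3, bO, b1, Bool.false_eq_true, if_true, if_false]
        decide
      · push Not at hO
        have hall : ∀ v ∈ l, v = "backward" ∨ v = "forward" := by
          intro v hv
          by_cases h2 : v = "backward"
          · exact Or.inl h2
          · by_cases h3 : v = "forward"
            · exact Or.inr h3
            · exact absurd (hO v hv (by rintro rfl; exact hB hv) h2) (by simp [h3])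
        have bO : (l.any fun v => !(v == "breaking" || v == "backward" || v == "forward")) = false := by
          rw [Bool.eq_false_iff]; intro h
          rcases List.any_eq_true.mp h with ⟨x, hx, he⟩
          rcases hall x hx with rfl | rfl <;> simp at he
        by_cases hBk : "backward" ∈ l
        · have bBk : l.any (· == "backward") = true := by
            rw [List.any_eq_true]; exact ⟨_, hBk, by simp⟩
          by_cases hF : "forward" ∈ l
          · have bF : l.any (· == "forward") = true := by
              rw [List.any_eq_true]; exact ⟨_, hF, by simp⟩
            have e1 : PySem.Set.equal (PySem.Set.ofList l) (PySem.Set.ofList ["backward"]) = false := by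
              rw [Bool.eq_false_iff]; intro h
              have := ((equal_ofList_iff l _).mp h "forward").mp hF
              simp at this
            have e2 : PySem.Set.equal (PySem.Set.ofList l) (PySem.Set.ofList ["forward"]) = false := by
              rw [Bool.eq_false_iff]; intro h
              have := ((equal_ofList_iff l _).mp h "backward").mp hBk
              simp at this
            have e3 : PySem.Set.equal (PySem.Set.ofList l) (PySem.Set.ofList ["backward", "forward"]) = true := by
              rw [equal_ofList_iff]
              intro x
              constructor
              · intro hx; simpa using hall x hx
              · intro hx
                rcases (by simpa using hx : x = "backward" ∨ x = "forward") with rfl | rfl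
                · exact hBk
                · exact hF
            simp only [pvV, a1, e1, e2, e3, b1, bO, bBk, bF, Bool.and_self,
              Bool.false_eq_true, if_true, if_false]
            decide
          · have bF : l.any (· == "forward") = false := by
              rw [Bool.eq_false_iff]; intro h
              rcases List.any_eq_true.mp h with ⟨x, hx, he⟩
              have hx' : x = "forward" := by simpa using he
              exact hF (hx' ▸ hx)
            have e1 : PySem.Set.equal (PySem.Set.ofList l) (PySem.Set.ofList ["backward"]) = true := by
              rw [equal_ofList_iff]
              intro x
              constructor
              · intro hx
                rcases hall x hx with rfl | rfl
                · simp
                · exact absurd hx hF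
              · intro hx
                rcases (by simpa using hx : x = "backward") with rfl
                exact hBk
            have bBk : l.any (· == "backward") = true := by
              rw [List.any_eq_true]; exact ⟨_, hBk, by simp⟩
            simp only [pvV, a1, e1, b1, bO, bBk, bF, Bool.and_false, Bool.false_eq_true,
              if_true, if_false]
            decide
        · have bBk : l.any (· == "backward") = false := by
            rw [Bool.eq_false_iff]; intro h
            rcases List.any_eq_true.mp h with ⟨x, hx, he⟩
            have hx' : x = "backward" := by simpa using he
            exact hBk (hx' ▸ hx)
          have hF : "forward" ∈ l := by
            rcases List.exists_mem_of_ne_nil l hlne with ⟨x, hx⟩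
            rcases hall x hx with rfl | rfl
            · exact absurd hx hBk
            · exact hx
          have bF : l.any (· == "forward") = true := by
            rw [List.any_eq_true]; exact ⟨_, hF, by simp⟩
          have e1 : PySem.Set.equal (PySem.Set.ofList l) (PySem.Set.ofList ["backward"]) = false := by
            rw [Bool.eq_false_iff]; intro h
            have := ((equal_ofList_iff l _).mp h "forward").mp hF
            simp at this
          have e2 : PySem.Set.equal (PySem.Set.ofList l) (PySem.Set.ofList ["forward"]) = true := by
            rw [equal_ofList_iff]
            intro x
            constructor
            · intro hx
              rcases hall x hx with rfl | rfl
              · exact absurd hx hBk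
              · simp
            · intro hx
              rcases (by simpa using hx : x = "forward") with rfl
              exact hF
          simp only [pvV, a1, e1, e2, b1, bO, bBk, bF, Bool.false_and, Bool.false_eq_true,
            if_true, if_false]
          decide
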